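-- pv_equiv track=rewrite | github.com/raoulesd/VideoShazam | src/find_box.py | getVideoSquare
-- ===== SOURCE A (Python) =====
-- def getVideoSquare(squares, videoSurface):
--     if len(squares)== 0:
--         return None
--     # Sort the squares by surface
--     sortedSquares = sorted(squares, key=squareSort)
--     # Take the largest one, is the safest choice
--     videoBox = sortedSquares[-1]
--     # If it falls outside of some bounds, delete the square and look at the next one.
--     surface = abs((videoBox[2][0] - videoBox[0][0]) * (videoBox[2][1] - videoBox[0][1]))
--     if ((surface < round(videoSurface/4)) or (surface > round((videoSurface * 7)/8))):
--         del sortedSquares[-1]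
--         getVideoSquare(sortedSquares, videoSurface)
--     else:
--         return sortedSquares[-1]
--
-- def getSurface(x1,y1,x2,y2):
--     return (x2 - x1) * (y2 - y1)
--
-- def squareSort(square):
--     return getSurface(square[0][0], square[0][1], square[2][0], square[2][1])
-- ===== SOURCE B (Python) =====
-- def getVideoSquare(squares, videoSurface):
--     if not squares:
--         return None
--     key = lambda sq: (sq[2][0] - sq[0][0]) * (sq[2][1] - sq[0][1])
--     best = squares[0]
--     for sq in squares[1:]:
--         if key(best) <= key(sq):
--             best = sq
--     surface = abs(key(best))
--     if round(videoSurface / 4) <= surface <= round((videoSurface * 7) / 8):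
--         return best
--     return None
-- ===== Notes on version B (the rewrite author's own statement) =====
-- stated objective: simpler
-- what changed: Replaces sort-then-recurse (re-sorting after deleting the maximum, with the recursive result discarded so out-of-bounds always yields None) by a single linear scan for the last maximum-key square followed by one bounds check.
import Mathlib
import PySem

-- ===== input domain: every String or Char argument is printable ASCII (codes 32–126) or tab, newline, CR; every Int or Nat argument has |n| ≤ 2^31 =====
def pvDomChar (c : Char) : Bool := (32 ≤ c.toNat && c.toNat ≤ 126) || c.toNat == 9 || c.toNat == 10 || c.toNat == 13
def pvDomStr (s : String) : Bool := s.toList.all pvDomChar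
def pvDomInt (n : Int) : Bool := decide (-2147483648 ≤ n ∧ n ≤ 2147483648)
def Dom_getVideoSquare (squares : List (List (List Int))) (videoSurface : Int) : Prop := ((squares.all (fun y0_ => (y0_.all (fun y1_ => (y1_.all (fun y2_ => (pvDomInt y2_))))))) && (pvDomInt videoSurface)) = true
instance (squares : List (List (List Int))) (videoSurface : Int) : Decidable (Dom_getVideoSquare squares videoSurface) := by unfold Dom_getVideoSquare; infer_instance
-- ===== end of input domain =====

-- B replaces A's sort / delete-last / dead recursion by one linear scan for the last
-- maximum-key square plus a single bounds check (objective: simpler).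

-- ===== PORT A =====
-- Python round(p/q) for q ∈ {4, 8} and |p| ≤ 7·2^31: the float division is exact there
-- (power-of-two divisor, numerator below 2^53), so round is exactly round-half-to-even of p/q.
def pyRoundHalf (p q : Int) : Int :=
  let fl := Int.fdiv p q
  let r := p - fl * q
  if 2 * r < q then fl else if q < 2 * r then fl + 1 else if fl % 2 = 0 then fl else fl + 1

-- squareSort(square) = getSurface(square[0][0], square[0][1], square[2][0], square[2][1])
def squareSortKey (sq : List (List Int)) : Int :=
  (PySem.List.pyGetD (PySem.List.pyGetD sq 2 []) 0 0 - PySem.List.pyGetD (PySem.List.pyGetD sq 0 []) 0 0)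
    * (PySem.List.pyGetD (PySem.List.pyGetD sq 2 []) 1 0 - PySem.List.pyGetD (PySem.List.pyGetD sq 0 []) 1 0)

def getVideoSquare (squares : List (List (List Int))) (videoSurface : Int) : Option (List (List Int)) :=
  if _h : squares.length = 0 then none
  else
    let sortedSquares := PySem.List.sorted squares squareSortKey
    let videoBox := PySem.List.pyGetD sortedSquares (-1) []
    let surface : Int :=
      |(PySem.List.pyGetD (PySem.List.pyGetD videoBox 2 []) 0 0 - PySem.List.pyGetD (PySem.List.pyGetD videoBox 0 []) 0 0)
        * (PySem.List.pyGetD (PySem.List.pyGetD videoBox 2 []) 1 0 - PySem.List.pyGetD (PySem.List.pyGetD videoBox 0 []) 1 0)|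
    if surface < pyRoundHalf videoSurface 4 ∨ pyRoundHalf (videoSurface * 7) 8 < surface then
      -- Python recurses here but DISCARDS the result, falling through to an implicit 'return None'
      let _ := getVideoSquare sortedSquares.dropLast videoSurface
      none
    else
      some (PySem.List.pyGetD sortedSquares (-1) [])
termination_by squares.length
decreasing_by
  simp [PySem.List.length_sorted]
  omega

-- ===== PORT B =====
def getVideoSquare_alt (squares : List (List (List Int))) (videoSurface : Int) : Option (List (List Int)) :=
  match squares with
  | [] => none
  | x :: rest =>
    let best := rest.foldl (fun b sq => if squareSortKey b ≤ squareSortKey sq then sq else b) x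
    let surface : Int := |squareSortKey best|
    if pyRoundHalf videoSurface 4 ≤ surface ∧ surface ≤ pyRoundHalf (videoSurface * 7) 8 then
      some best
    else none

-- ===== PRECONDITION & SPEC =====
-- Pre_ excludes exactly the inputs on which Python A raises IndexError: some square lacking
-- index 2, or its corner lists sq[0] / sq[2] lacking index 1.
def Pre_getVideoSquare (squares : List (List (List Int))) (videoSurface : Int) : Prop :=
  ∀ sq ∈ squares, 3 ≤ sq.length ∧ 2 ≤ (sq.getD 0 []).length ∧ 2 ≤ (sq.getD 2 []).length
instance (squares : List (List (List Int))) (videoSurface : Int) : Decidable (Pre_getVideoSquare squares videoSurface) := by unfold Pre_getVideoSquare; infer_instance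

def pvWitness_getVideoSquare : List (List (List Int)) × Int := ([[[0,0],[0,2],[2,2],[2,0]]], 16)

def Spec_getVideoSquare (squares : List (List (List Int))) (videoSurface : Int) (out : Option (List (List Int))) : Prop := out = getVideoSquare_alt squares videoSurface
instance (squares : List (List (List Int))) (videoSurface : Int) (out : Option (List (List Int))) : Decidable (Spec_getVideoSquare squares videoSurface out) := by unfold Spec_getVideoSquare; infer_instance

-- ===== CLAIM (what is proved, stated in full; the proofs are below) =====
def Claim_equal_getVideoSquare : Prop := ∀ (squares : List (List (List Int))) (videoSurface : Int), Dom_getVideoSquare squares videoSurface → Pre_getVideoSquare squares videoSurface → Spec_getVideoSquare squares videoSurface (getVideoSquare squares videoSurface)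

-- ===== LEMMAS AND PROOFS =====

theorem pv_insertBy_ne_nil {α : Type} (bf : α → α → Bool) (x : α) (acc : List α) :
    PySem.List.insertBy bf x acc ≠ [] := by
  cases acc with
  | nil => simp [PySem.List.insertBy]
  | cons y ys => simp only [PySem.List.insertBy]; split <;> simp

theorem pv_insertBy_pairwise {α : Type} (key : α → Int) (x : α) (acc : List α)
    (hp : acc.Pairwise (fun a b => key a ≤ key b)) :
    (PySem.List.insertBy (fun a b => decide (key a < key b)) x acc).Pairwise
      (fun a b => key a ≤ key b) := by
  induction acc with
  | nil => simp [PySem.List.insertBy]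
  | cons y ys ih =>
    rw [List.pairwise_cons] at hp
    by_cases hxy : key x < key y
    · have he : PySem.List.insertBy (fun a b => decide (key a < key b)) x (y :: ys) = x :: y :: ys := by
        simp [PySem.List.insertBy, hxy]
      rw [he, List.pairwise_cons]
      refine ⟨?_, List.pairwise_cons.mpr ⟨hp.1, hp.2⟩⟩
      intro z hz
      rcases List.mem_cons.mp hz with rfl | hz
      · exact le_of_lt hxy
      · exact le_of_lt (lt_of_lt_of_le hxy (hp.1 z hz))
    · have he : PySem.List.insertBy (fun a b => decide (key a < key b)) x (y :: ys)
          = y :: PySem.List.insertBy (fun a b => decide (key a < key b)) x ys := by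
        simp [PySem.List.insertBy, hxy]
      rw [he, List.pairwise_cons]
      refine ⟨?_, ih hp.2⟩
      intro z hz
      rcases (PySem.List.mem_insertBy _ _ _ _).mp hz with rfl | hz
      · exact le_of_not_gt hxy
      · exact hp.1 z hz

theorem pv_insertBy_getLast? {α : Type} (key : α → Int) (x : α) (acc : List α)
    (hp : acc.Pairwise (fun a b => key a ≤ key b)) :
    (PySem.List.insertBy (fun a b => decide (key a < key b)) x acc).getLast?
      = some (match acc.getLast? with
              | none => x
              | some l => if key l ≤ key x then x else l) := by
  induction acc with
  | nil => simp [PySem.List.insertBy]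
  | cons y ys ih =>
    rw [List.pairwise_cons] at hp
    by_cases hxy : key x < key y
    · have he : PySem.List.insertBy (fun a b => decide (key a < key b)) x (y :: ys) = x :: y :: ys := by
        simp [PySem.List.insertBy, hxy]
      rw [he]
      obtain ⟨l, hl⟩ : ∃ l, (y :: ys).getLast? = some l := by
        cases h : (y :: ys).getLast? with
        | none => simp at h
        | some l => exact ⟨l, rfl⟩
      have hmem : l ∈ y :: ys := List.mem_of_getLast? hl
      have hyl : key y ≤ key l := by
        rcases List.mem_cons.mp hmem with rfl | hm
        · exact le_refl _
        · exact hp.1 l hm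
      have hxl : ¬ key l ≤ key x := by
        have := lt_of_lt_of_le hxy hyl
        omega
      rw [List.getLast?_cons_cons, hl]
      simp [hxl]
    · have he : PySem.List.insertBy (fun a b => decide (key a < key b)) x (y :: ys)
          = y :: PySem.List.insertBy (fun a b => decide (key a < key b)) x ys := by
        simp [PySem.List.insertBy, hxy]
      rw [he]
      cases ys with
      | nil =>
        simp [PySem.List.insertBy, le_of_not_gt hxy]
      | cons z zs =>
        rcases e : PySem.List.insertBy (fun a b => decide (key a < key b)) x (z :: zs) with _ | ⟨w, ws⟩
        · exact absurd e (pv_insertBy_ne_nil _ _ _)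
        · have ihh := ih hp.2
          rw [e] at ihh
          rw [List.getLast?_cons_cons (a := y) (b := w), ihh, List.getLast?_cons_cons]

theorem pv_fold_getLast? {α : Type} (key : α → Int) (rest : List α) :
    ∀ (acc : List α) (l : α), acc.Pairwise (fun a b => key a ≤ key b) → acc.getLast? = some l →
    (rest.foldl (fun a x => PySem.List.insertBy (fun a b => decide (key a < key b)) x a) acc).getLast?
      = some (rest.foldl (fun b x => if key b ≤ key x then x else b) l) := by
  induction rest with
  | nil => intro acc l _ hl; simpa using hl
  | cons y t ih =>
    intro acc l hp hl
    simp only [List.foldl_cons]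
    refine ih _ _ (pv_insertBy_pairwise key y acc hp) ?_
    rw [pv_insertBy_getLast? key y acc hp, hl]

theorem pv_sorted_getLast? (key : List (List Int) → Int) (x : List (List Int)) (rest : List (List (List Int))) :
    (PySem.List.sorted (x :: rest) key).getLast?
      = some (rest.foldl (fun b sq => if key b ≤ key sq then sq else b) x) := by
  rw [PySem.List.sorted_eq_foldl_insertBy]
  simp only [List.foldl_cons]
  have h1 : PySem.List.insertBy (fun a b => decide (key a < key b)) x ([] : List (List (List Int))) = [x] := by
    simp [PySem.List.insertBy]
  rw [h1]
  exact pv_fold_getLast? key rest [x] x (by simp) (by simp)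

-- ===== VERDICT (by name: the statement is the Claim_ definition above) =====
theorem getVideoSquare_spec : Claim_equal_getVideoSquare := by
  intro squares videoSurface _ _
  unfold Spec_getVideoSquare
  cases squares with
  | nil => simp [getVideoSquare, getVideoSquare_alt]
  | cons x rest =>
    rw [getVideoSquare]
    have hlen : ¬ (x :: rest).length = 0 := by simp
    have hne : PySem.List.sorted (x :: rest) squareSortKey ≠ [] := by
      intro h
      rw [PySem.List.sorted_eq_nil_iff] at h
      exact List.cons_ne_nil _ _ h
    set best := rest.foldl (fun b sq => if squareSortKey b ≤ squareSortKey sq then sq else b) x with hbest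
    have hlast : (PySem.List.sorted (x :: rest) squareSortKey).getLast? = some best :=
      pv_sorted_getLast? squareSortKey x rest
    have hbox : PySem.List.pyGetD (PySem.List.sorted (x :: rest) squareSortKey) (-1) [] = best := by
      rw [PySem.List.pyGetD_neg_one _ [] hne]
      have := List.getLast?_eq_some_getLast (l := PySem.List.sorted (x :: rest) squareSortKey) hne
      rw [this] at hlast
      exact Option.some_injective _ hlast
    simp only [hlen, dif_neg, not_false_iff, hbox]
    have halt : getVideoSquare_alt (x :: rest) videoSurface
        = if pyRoundHalf videoSurface 4 ≤ |squareSortKey best| ∧ |squareSortKey best| ≤ pyRoundHalf (videoSurface * 7) 8 then some best else none := rfl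
    rw [halt]
    simp only [squareSortKey]
    set S : Int := |(PySem.List.pyGetD (PySem.List.pyGetD best 2 []) 0 0 - PySem.List.pyGetD (PySem.List.pyGetD best 0 []) 0 0)
        * (PySem.List.pyGetD (PySem.List.pyGetD best 2 []) 1 0 - PySem.List.pyGetD (PySem.List.pyGetD best 0 []) 1 0)| with hS
    by_cases h : pyRoundHalf videoSurface 4 ≤ S ∧ S ≤ pyRoundHalf (videoSurface * 7) 8
    · rw [if_neg ?_, if_pos h]
      rintro (hp | hp)
      · exact (not_lt.mpr h.1) hp
      · exact (not_lt.mpr h.2) hp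
    · rw [if_pos ?_, if_neg h]
      by_cases hlo : pyRoundHalf videoSurface 4 ≤ S
      · exact Or.inr (by
          rcases not_and_or.mp h with h1 | h2
          · exact absurd hlo h1
          · exact not_le.mp h2)
      · exact Or.inl (not_le.mp hlo)
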